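-- pv_equiv track=rewrite | github.com/Dan-jpg2/CSIK_Prog | modul10/o0_to_o5.py | stats_by_hostname
-- ===== SOURCE A (Python) =====
-- def stats_by_hostname(auth_log):
--     n = len(auth_log)
--     d = {}
--     i = 0
--     while i < n:
--         hostname, timestamp, username, result = auth_log[i]
--
--         if hostname not in d:
--             #her er første gang vi ser dette hostname
--             d[hostname] = (timestamp, timestamp, 1)
--         else:
--             first, last, count = d[hostname]
--             if timestamp < first:
--                 first = timestamp
--             if timestamp > last:
--                 last = timestamp
--             count += 1
--             d[hostname] = (first, last, count)
--         i += 1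
--     #omdanner ordbogen til en liste (tuples)
--     result = []
--     for hostname in d:
--         first, last, count = d[hostname]
--         result.append((hostname, first, last, count))
--     return result
-- ===== SOURCE B (Python) =====
-- def stats_by_hostname(auth_log):
--     groups = {}
--     for hostname, timestamp, _username, _result in auth_log:
--         groups.setdefault(hostname, []).append(timestamp)
--     return [(h, min(ts), max(ts), len(ts)) for h, ts in groups.items()]
-- ===== Notes on version B (the rewrite author's own statement) =====
-- stated objective: idiomatic
-- what changed: B groups all timestamps per hostname into lists in one pass (setdefault) and computes min/max/len in a separate reduction pass, instead of A's index-based while loop maintaining a running (first,last,count) triple per key.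
import Mathlib
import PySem

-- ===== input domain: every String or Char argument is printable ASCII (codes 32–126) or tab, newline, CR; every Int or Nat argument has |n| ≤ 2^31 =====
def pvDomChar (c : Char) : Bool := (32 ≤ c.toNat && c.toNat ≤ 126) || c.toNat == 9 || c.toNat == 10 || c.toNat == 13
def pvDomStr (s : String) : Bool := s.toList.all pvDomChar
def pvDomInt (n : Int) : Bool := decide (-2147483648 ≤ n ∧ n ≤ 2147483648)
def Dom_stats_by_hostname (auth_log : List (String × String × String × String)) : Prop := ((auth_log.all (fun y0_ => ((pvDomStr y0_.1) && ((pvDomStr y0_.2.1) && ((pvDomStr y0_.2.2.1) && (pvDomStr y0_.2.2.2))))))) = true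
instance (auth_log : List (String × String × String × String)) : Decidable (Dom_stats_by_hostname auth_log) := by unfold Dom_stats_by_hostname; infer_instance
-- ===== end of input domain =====

-- B groups all timestamps per hostname into lists in one pass and reduces each group with
-- min/max/len in a second pass, instead of A's index while-loop maintaining a running
-- (first, last, count) triple; objective: more idiomatic, same O(n) cost.

-- ===== PORT A =====
-- A's while-loop body: one record updates the running (first, last, count) dict.
def pvStepA (d : PySem.Dict String (String × String × Int))
    (r : String × String × String × String) : PySem.Dict String (String × String × Int) :=
  let hostname := r.1
  let timestamp := r.2.1
  if d.contains hostname = false then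
    d.insert hostname (timestamp, timestamp, 1)
  else
    let flc := d.getD hostname ("", "", 0)
    let first := if timestamp < flc.1 then timestamp else flc.1
    let last := if timestamp > flc.2.1 then timestamp else flc.2.1
    d.insert hostname (first, last, flc.2.2 + 1)

-- A's result-loop body: one row of the output list.
def pvRowA (d : PySem.Dict String (String × String × Int)) (hostname : String) :
    String × String × String × Int :=
  let flc := d.getD hostname ("", "", 0)
  (hostname, flc.1, flc.2.1, flc.2.2)

def stats_by_hostname (auth_log : List (String × String × String × String)) : List (String × String × String × Int) :=
  let n : Int := PySem.List.len auth_log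
  let d : PySem.Dict String (String × String × Int) :=
    (PySem.List.pyRange 0 n 1).foldl
      (fun d i => pvStepA d (PySem.List.pyGetD auth_log i ("", "", "", ""))) PySem.Dict.empty
  d.keys.foldl (fun res hostname => res ++ [pvRowA d hostname]) []

-- ===== PORT B =====
def stats_by_hostname_alt (auth_log : List (String × String × String × String)) : List (String × String × String × Int) :=
  let groups : PySem.Dict String (List String) :=
    auth_log.foldl (fun g r => g.modify r.1 [] (fun ts => ts ++ [r.2.1])) PySem.Dict.empty
  groups.items.map (fun p =>
    (p.1, (PySem.List.min? p.2 (fun x => x)).getD "",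
          (PySem.List.max? p.2 (fun x => x)).getD "",
          PySem.List.len p.2))

-- ===== PRECONDITION & SPEC =====
def Spec_stats_by_hostname (auth_log : List (String × String × String × String)) (out : List (String × String × String × Int)) : Prop := out = stats_by_hostname_alt auth_log
instance (auth_log : List (String × String × String × String)) (out : List (String × String × String × Int)) : Decidable (Spec_stats_by_hostname auth_log out) := by unfold Spec_stats_by_hostname; infer_instance

-- ===== CLAIM (what is proved, stated in full; the proofs are below) =====
def Claim_equal_stats_by_hostname : Prop := ∀ (auth_log : List (String × String × String × String)), Dom_stats_by_hostname auth_log → Spec_stats_by_hostname auth_log (stats_by_hostname auth_log)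

-- ===== LEMMAS AND PROOFS =====

-- One aggregation step of A, phrased on the optional previous triple.
def pvAggStep (o : Option (String × String × Int)) (t : String) : String × String × Int :=
  match o with
  | none => (t, t, 1)
  | some flc =>
      ((if t < flc.1 then t else flc.1), (if t > flc.2.1 then t else flc.2.1), flc.2.2 + 1)

-- A's loop body equals a single insert of the aggregated value.
theorem pvStepA_eq_insert (d : PySem.Dict String (String × String × Int))
    (r : String × String × String × String) :
    pvStepA d r = d.insert r.1 (pvAggStep (d.get? r.1) r.2.1) := by
  cases h : d.get? r.1 with
  | none => simp [pvStepA, pvAggStep, PySem.Dict.contains_eq_isSome_get?, h]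
  | some v => simp [pvStepA, pvAggStep, PySem.Dict.contains_eq_isSome_get?,
      PySem.Dict.getD_eq_get?_getD, h]

-- Characterisation of A's dict lookups after the loop.
theorem foldA_get? (l : List (String × String × String × String))
    (d : PySem.Dict String (String × String × Int)) (h : String) :
    (l.foldl (fun d r => d.insert r.1 (pvAggStep (d.get? r.1) r.2.1)) d).get? h
    = ((l.filter (fun p => p.1 == h)).map (fun p => p.2.1)).foldl
        (fun o t => some (pvAggStep o t)) (d.get? h) := by
  induction l generalizing d with
  | nil => rfl
  | cons r rest ih =>
      simp only [List.foldl_cons, ih, List.filter_cons]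
      by_cases hr : r.1 = h
      · simp [hr, PySem.Dict.get?_insert_self]
      · have hb : (r.1 == h) = false := by simp [hr]
        rw [PySem.Dict.get?_insert_of_ne d (pvAggStep (d.get? r.1) r.2.1) (Ne.symm hr)]
        simp [hb]

-- Folding the some-lifted step from a some start.
theorem foldSome (ts : List String) (a : String × String × Int) :
    ts.foldl (fun o t => some (pvAggStep o t)) (some a)
    = some (ts.foldl (fun acc t => pvAggStep (some acc) t) a) := by
  induction ts generalizing a with
  | nil => rfl
  | cons t rest ih => simp [ih]

-- The running triple fold is componentwise (min, max, count).
theorem foldTriple (rest : List String) (f la : String) (c : Int) :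
    rest.foldl (fun acc t => pvAggStep (some acc) t) (f, la, c)
    = (rest.foldl min f, rest.foldl max la, c + rest.length) := by
  induction rest generalizing f la c with
  | nil => simp
  | cons t rest ih =>
      have hstep : pvAggStep (some (f, la, c)) t
          = ((if t < f then t else f), (if t > la then t else la), c + 1) := rfl
      rw [List.foldl_cons, hstep, ih]
      simp only [List.length_cons]
      have h1 : (if t < f then t else f) = min f t := by
        rw [min_def]; by_cases h : t < f
        · simp [h, not_le.mpr h]
        · simp [h, not_lt.mp h]
      have h2 : (if t > la then t else la) = max la t := by
        rw [max_def]; by_cases h : la < t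
        · simp [h, le_of_lt h]
        · rcases eq_or_lt_of_le (not_lt.mp h) with h' | h'
          · simp [h']
          · simp [h, not_le.mpr h']
      simp only [List.foldl_cons]
      rw [h1, h2]
      simp only [Prod.mk.injEq, true_and]
      push_cast; ring

theorem main_eq (l : List (String × String × String × String)) :
    stats_by_hostname l = stats_by_hostname_alt l := by
  show (let n : Int := PySem.List.len l
    let d := (PySem.List.pyRange 0 n 1).foldl
      (fun d i => pvStepA d (PySem.List.pyGetD l i ("", "", "", ""))) PySem.Dict.empty
    d.keys.foldl (fun res hostname => res ++ [pvRowA d hostname]) [])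
    = (let groups := l.foldl (fun g r => g.modify r.1 [] (fun ts => ts ++ [r.2.1])) PySem.Dict.empty
       groups.items.map (fun p =>
        (p.1, (PySem.List.min? p.2 (fun x => x)).getD "",
              (PySem.List.max? p.2 (fun x => x)).getD "",
              PySem.List.len p.2)))
  simp only []
  rw [PySem.List.foldl_pyRange_zero_pyGetD]
  rw [show pvStepA = (fun d (r : String × String × String × String) =>
        d.insert r.1 (pvAggStep (d.get? r.1) r.2.1)) from funext₂ pvStepA_eq_insert]
  rw [PySem.List.foldl_append_singleton_eq_map]
  -- B's grouping dict
  have hnodB : (l.foldl (fun g r => g.modify r.1 [] (fun ts => ts ++ [r.2.1]))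
      PySem.Dict.empty).keys.Nodup := by
    apply PySem.Dict.nodup_keys_foldl_modify_key
    simp [PySem.Dict.keys_empty]
  rw [PySem.Dict.items_eq_map_keys _ hnodB []]
  rw [List.map_map]
  -- keys of both dicts coincide
  have hkA : (l.foldl (fun d (r : String × String × String × String) =>
      d.insert r.1 (pvAggStep (d.get? r.1) r.2.1)) PySem.Dict.empty).keys
      = PySem.Set.ofList (l.map (·.1)) := by
    rw [PySem.Dict.keys_foldl_insert_key]
    simp [PySem.Dict.keys_empty, PySem.Set.update_nil_left]
  have hkB : (l.foldl (fun g r => g.modify r.1 [] (fun ts => ts ++ [r.2.1]))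
      PySem.Dict.empty).keys = PySem.Set.ofList (l.map (·.1)) := by
    rw [PySem.Dict.keys_foldl_modify_key]
    simp [PySem.Dict.keys_empty, PySem.Set.update_nil_left]
  rw [hkA, hkB]
  apply List.map_congr_left
  intro h hmem
  simp only [Function.comp_apply]
  -- the group of h is exactly the filtered timestamps
  have hgrp : (l.foldl (fun g r => g.modify r.1 [] (fun ts => ts ++ [r.2.1]))
      PySem.Dict.empty).getD h []
      = (l.filter (fun r => r.1 == h)).map (fun r => r.2.1) := by
    have : (l.foldl (fun g r => g.modify r.1 [] (fun ts => ts ++ [r.2.1])) PySem.Dict.empty)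
        = ((l.map (fun r => (r.1, r.2.1))).foldl
            (fun g p => g.modify p.1 [] (fun ts => ts ++ [p.2])) PySem.Dict.empty) := by
      rw [List.foldl_map]
    rw [this, PySem.Dict.getD_foldl_modify_append]
    simp [List.filter_map, Function.comp_def]
  -- that list is nonempty since h is a key
  have hne : (l.filter (fun r => r.1 == h)).map (fun r => r.2.1) ≠ [] := by
    rw [PySem.Set.mem_ofList] at hmem
    rcases List.mem_map.mp hmem with ⟨r, hr, hr1⟩
    simp only [ne_eq, List.map_eq_nil_iff, List.filter_eq_nil_iff, not_forall]
    exact ⟨r, hr, by simp [hr1]⟩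
  rcases hts : (l.filter (fun r => r.1 == h)).map (fun r => r.2.1) with _ | ⟨t, rest⟩
  · exact absurd hts hne
  -- A's row at h
  unfold pvRowA
  rw [PySem.Dict.getD_eq_get?_getD, foldA_get?]
  simp only [PySem.Dict.get?_empty]
  have hfilter : (l.filter (fun p => p.1 == h)).map (fun p => p.2.1) = t :: rest := hts
  rw [hfilter, List.foldl_cons, foldSome]
  rw [hgrp, hts]
  have h0 : pvAggStep none t = (t, t, 1) := rfl
  rw [h0, foldTriple]
  rw [PySem.List.min?_id_cons, PySem.List.max?_id_cons]
  simp only [Option.getD_some, PySem.List.len, List.length_cons]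
  simp only [Prod.mk.injEq, true_and]
  push_cast; ring

-- ===== VERDICT (by name: the statement is the Claim_ definition above) =====
theorem stats_by_hostname_spec : Claim_equal_stats_by_hostname := by
  intro l _
  unfold Spec_stats_by_hostname
  exact main_eq l
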